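-- pv_equiv track=rewrite | github.com/SSteel2/AdventOfCode | 2024/17/17.py | _solution_to_binary_string
-- ===== SOURCE A (Python) =====
-- def _solution_to_binary_string(solution, replace_empty):
-- 	max_key = max(solution.keys())
-- 	stringified = []
-- 	for i in range(max_key, -1, -1):
-- 		if i in solution:
-- 			stringified.append(str(solution[i]))
-- 		else:
-- 			if replace_empty:
-- 				stringified.append('0')
-- 			else:
-- 				stringified.append('_')
-- 	return ''.join(stringified)
-- ===== SOURCE B (Python) =====
-- def _solution_to_binary_string(solution, replace_empty):
-- 	max_key = max(solution.keys())
-- 	buf = [('0' if replace_empty else '_')] * (max_key + 1)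
-- 	for k, v in solution.items():
-- 		if 0 <= k <= max_key:
-- 			buf[max_key - k] = str(v)
-- 	return ''.join(buf)
-- ===== Notes on version B (the rewrite author's own statement) =====
-- stated objective: faster
-- what changed: Instead of scanning every index from max_key down to 0 with a membership test per position, B pre-fills a buffer of default characters and scatters the dict's items into it by index.
import Mathlib
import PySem

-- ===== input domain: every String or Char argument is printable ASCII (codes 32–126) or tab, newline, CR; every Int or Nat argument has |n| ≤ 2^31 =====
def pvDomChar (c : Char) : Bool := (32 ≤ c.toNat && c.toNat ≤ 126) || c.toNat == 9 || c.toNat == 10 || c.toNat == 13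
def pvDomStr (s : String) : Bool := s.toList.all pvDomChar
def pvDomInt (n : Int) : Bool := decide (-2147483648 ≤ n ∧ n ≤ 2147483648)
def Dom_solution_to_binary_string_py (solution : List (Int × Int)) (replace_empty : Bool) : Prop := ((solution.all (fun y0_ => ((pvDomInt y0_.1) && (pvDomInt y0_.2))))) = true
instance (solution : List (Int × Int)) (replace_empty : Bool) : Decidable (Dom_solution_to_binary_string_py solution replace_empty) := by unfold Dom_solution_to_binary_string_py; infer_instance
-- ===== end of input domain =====

-- B pre-fills a buffer of default characters and scatters the dict items into it by index,
-- instead of scanning every index from max_key down to 0 with a membership test (objective: faster, constant factor).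


-- ===== PORT A =====
-- `i in solution` followed by `solution[i]` is ported as one `match d.get? i` (contains = get?.isSome);
-- max() over an empty dict raises ValueError in Python: excluded by Pre_ (the `none` arm is unreachable there).
def solution_to_binary_string_py (solution : List (Int × Int)) (replace_empty : Bool) : String :=
  let d := PySem.Dict.ofList solution
  match PySem.List.max? d.keys (fun x => x) with
  | none => ""
  | some max_key =>
    let stringified := (PySem.List.pyRange max_key (-1) (-1)).foldl
      (fun acc i =>
        match d.get? i with
        | some v => acc ++ [PySem.Int.toStr v]
        | none => acc ++ [if replace_empty then "0" else "_"]) ([] : List String)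
    PySem.Str.join "" stringified

-- ===== PORT B =====
def solution_to_binary_string_py_alt (solution : List (Int × Int)) (replace_empty : Bool) : String :=
  let d := PySem.Dict.ofList solution
  match PySem.List.max? d.keys (fun x => x) with
  | none => ""
  | some max_key =>
    let buf : List String := PySem.List.pyRepeat [if replace_empty then "0" else "_"] (max_key + 1)
    let buf := d.items.foldl
      (fun b kv =>
        if 0 ≤ kv.1 ∧ kv.1 ≤ max_key then PySem.List.pySetD b (max_key - kv.1) (PySem.Int.toStr kv.2) else b)
      buf
    PySem.Str.join "" buf

-- ===== PRECONDITION & SPEC =====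
-- Pre_ excludes only the empty dict, on which Python's max() raises ValueError (in A and in B alike).
def Pre_solution_to_binary_string_py (solution : List (Int × Int)) (replace_empty : Bool) : Prop := solution ≠ []
instance (solution : List (Int × Int)) (replace_empty : Bool) : Decidable (Pre_solution_to_binary_string_py solution replace_empty) := by unfold Pre_solution_to_binary_string_py; infer_instance
def pvWitness_solution_to_binary_string_py : (List (Int × Int)) × Bool := ([(2, 1), (0, 0)], true)
def Spec_solution_to_binary_string_py (solution : List (Int × Int)) (replace_empty : Bool) (out : String) : Prop := out = solution_to_binary_string_py_alt solution replace_empty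
instance (solution : List (Int × Int)) (replace_empty : Bool) (out : String) : Decidable (Spec_solution_to_binary_string_py solution replace_empty out) := by unfold Spec_solution_to_binary_string_py; infer_instance

-- ===== CLAIM (what is proved, stated in full; the proofs are below) =====
def Claim_equal_solution_to_binary_string_py : Prop := ∀ (solution : List (Int × Int)) (replace_empty : Bool), Dom_solution_to_binary_string_py solution replace_empty → Pre_solution_to_binary_string_py solution replace_empty → Spec_solution_to_binary_string_py solution replace_empty (solution_to_binary_string_py solution replace_empty)

-- ===== LEMMAS AND PROOFS =====

-- reading a list back from indexed lookups reconstructs it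
theorem pv_map_range_getD {α : Type} (l : List α) (dflt : α) :
    (List.range l.length).map (fun k => l[k]?.getD dflt) = l := by
  apply List.ext_getElem
  · simp
  · intro n h1 h2
    simp [List.getElem?_eq_getElem h2]

-- the scatter loop of B, characterised pointwise by first-match lookup (valid for nodup keys)
theorem pv_scatter_eq (M : Int) (items : List (Int × Int))
    (hnd : (items.map Prod.fst).Nodup) (b : List String)
    (hb : b.length = (M + 1).toNat) :
    items.foldl
      (fun b kv =>
        if 0 ≤ kv.1 ∧ kv.1 ≤ M then PySem.List.pySetD b (M - kv.1) (PySem.Int.toStr kv.2) else b) b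
    = (List.range (M + 1).toNat).map
        (fun (k : Nat) =>
          match (PySem.Dict.mk items).get? (M - (k : Int)) with
          | some v => PySem.Int.toStr v
          | none => b[k]?.getD "") := by
  induction items generalizing b with
  | nil =>
    simp only [List.foldl_nil, PySem.Dict.get?]
    rw [← hb]
    exact (pv_map_range_getD b "").symm
  | cons kv rest ih =>
    obtain ⟨k, v⟩ := kv
    simp only [List.map_cons, List.nodup_cons] at hnd
    obtain ⟨hknot, hndr⟩ := hnd
    simp only [List.foldl_cons]
    set b' := (if 0 ≤ k ∧ k ≤ M then PySem.List.pySetD b (M - k) (PySem.Int.toStr v) else b) with hb'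
    have hlen' : b'.length = (M + 1).toNat := by
      rw [hb']; split_ifs <;> simp [PySem.List.length_pySetD, hb]
    rw [ih hndr b' hlen']
    apply List.map_congr_left
    intro j hj
    rw [List.mem_range] at hj
    have hjM : (j : Int) ≤ M := by omega
    have hM0 : (0 : Int) ≤ M := by omega
    rw [PySem.Dict.get?_mk_cons]
    by_cases hk : k = M - (j : Int)
    · have hrest : (PySem.Dict.mk rest).get? (M - (j : Int)) = none := by
        rw [PySem.Dict.get?_eq_none_iff_not_mem_keys]
        simpa [PySem.Dict.keys, hk] using hknot
      have hset : b' = b.set j (PySem.Int.toStr v) := by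
        rw [hb', if_pos ⟨by omega, by omega⟩,
          PySem.List.pySetD_of_nonneg (h := show (0:Int) ≤ M - k by omega)]
        congr 1
        omega
      have hjb : j < b.length := by omega
      simp [hk, hrest, hset, hjb]
    · have hkj : (k == M - (j : Int)) = false := by simp [hk]
      have hbj : b'[j]?.getD "" = b[j]?.getD "" := by
        rw [hb']
        split_ifs with hg
        · rw [PySem.List.pySetD_of_nonneg (h := show (0:Int) ≤ M - k by omega)]
          have hne : (M - k).toNat ≠ j := by omega
          rw [List.getElem?_set_ne hne]
        · rfl
      rw [hkj]
      cases (PySem.Dict.mk rest).get? (M - (j : Int)) with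
      | none => simpa using hbj
      | some w => rfl

-- ===== VERDICT (by name: the statement is the Claim_ definition above) =====
theorem solution_to_binary_string_py_spec : Claim_equal_solution_to_binary_string_py := by
  intro solution replace_empty _ _
  unfold Spec_solution_to_binary_string_py
  unfold solution_to_binary_string_py solution_to_binary_string_py_alt
  have hnd : ((PySem.Dict.ofList solution).items.map Prod.fst).Nodup := by
    have := PySem.Dict.nodup_keys_ofList (κ := Int) (ν := Int) solution
    simpa [PySem.Dict.keys] using this
  cases hmax : PySem.List.max? (PySem.Dict.ofList solution).keys (fun x => x) with
  | none => simp only [hmax]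
  | some M =>
    simp only [hmax]
    congr 1
    have hfun : (fun (acc : List String) (i : Int) =>
        match (PySem.Dict.ofList solution).get? i with
        | some v => acc ++ [PySem.Int.toStr v]
        | none => acc ++ [if replace_empty then "0" else "_"])
      = (fun acc i => acc ++ [match (PySem.Dict.ofList solution).get? i with
        | some v => PySem.Int.toStr v
        | none => if replace_empty then "0" else "_"]) := by
      funext acc i
      cases (PySem.Dict.ofList solution).get? i <;> rfl
    rw [hfun, PySem.List.foldl_append_singleton_eq_map, List.nil_append,
      PySem.List.pyRange_neg_one, List.map_map]
    rw [PySem.List.pyRepeat_singleton,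
      pv_scatter_eq M _ hnd _ (by simp)]
    have hmk : (PySem.Dict.mk (PySem.Dict.ofList solution).items) = PySem.Dict.ofList solution := rfl
    rw [hmk]
    have hN : (M - -1).toNat = (M + 1).toNat := by omega
    rw [hN]
    apply List.map_congr_left
    intro j hj
    rw [List.mem_range] at hj
    simp only [Function.comp]
    cases (PySem.Dict.ofList solution).get? (M - (j : Int)) with
    | some v => rfl
    | none =>
      simp [hj]
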